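-- pv_equiv track=rewrite | github.com/Kasiet2001/leetcode | num_of_ways_to_assign_edge_weights_I.py | assignEdgeWeights
-- ===== SOURCE A (Python) =====
-- from collections import defaultdict, deque
--
-- def assignEdgeWeights(edges):
--     MOD = 10 ** 9 + 7
--     tree = defaultdict(list)
--     n = 0
--     for u, v in edges:
--         tree[u].append(v)
--         tree[v].append(u)
--         if u > n:
--             n = u
--         if v > n:
--             n = v
--     depth = [0] * (n + 1)
--     visited = [False] * (n + 1)
--     queue = deque([1])
--     visited[1] = True
--     max_depth = 0
--
--     while queue:
--         node = queue.popleft()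
--         for neighbor in tree[node]:
--             if not visited[neighbor]:
--                 visited[neighbor] = True
--                 depth[neighbor] = depth[node] + 1
--                 max_depth = max(max_depth, depth[neighbor])
--                 queue.append(neighbor)
--
--     if max_depth == 0:
--         return 0
--
--     return pow(2, max_depth - 1, MOD)
-- ===== SOURCE B (Python) =====
-- def assignEdgeWeights(edges):
--     MOD = 10 ** 9 + 7
--     dist = {1: 0}
--     for _ in range(2 * len(edges)):
--         for u, v in edges:
--             for a, b in ((u, v), (v, u)):
--                 if a in dist and (b not in dist or dist[a] + 1 < dist[b]):
--                     dist[b] = dist[a] + 1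
--     m = max(dist.values())
--     return 0 if m == 0 else pow(2, m - 1, MOD)
-- ===== Notes on version B (the rewrite author's own statement) =====
-- stated objective: alternative
-- what changed: Replaces the BFS (adjacency defaultdict, deque, visited[] and depth[] arrays indexed by label) with Bellman-Ford edge relaxation: a dist dict seeded with {1:0} is relaxed over the raw edge list for 2*len(edges) rounds, and the answer is the maximum dist value; no adjacency list, queue or label-indexed arrays exist.
-- outside the precondition, e.g. on assignEdgeWeights([[1, 2], [2, -1]]): A returns 1, B returns 2; on assignEdgeWeights([]): A raises IndexError, B returns 0
import Mathlib
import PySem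

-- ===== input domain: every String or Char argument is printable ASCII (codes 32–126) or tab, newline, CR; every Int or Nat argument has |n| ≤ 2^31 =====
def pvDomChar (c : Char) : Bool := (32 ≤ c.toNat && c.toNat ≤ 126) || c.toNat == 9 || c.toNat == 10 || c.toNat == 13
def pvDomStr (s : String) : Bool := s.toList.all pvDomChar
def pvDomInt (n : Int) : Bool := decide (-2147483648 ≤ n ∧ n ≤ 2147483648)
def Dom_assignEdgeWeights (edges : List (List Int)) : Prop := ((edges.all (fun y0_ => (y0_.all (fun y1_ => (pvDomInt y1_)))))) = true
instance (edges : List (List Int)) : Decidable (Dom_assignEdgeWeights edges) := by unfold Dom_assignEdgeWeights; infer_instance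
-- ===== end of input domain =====

-- B replaces A's BFS (adjacency dict, deque, visited[]/depth[] arrays) by Bellman-Ford edge
-- relaxation over the raw edge list; an alternative algorithm of similar size, not claimed faster.

-- ===== PORT A =====
-- builds A's defaultdict adjacency (tree[u].append(v); tree[v].append(u)) and the running max label n;
-- an inner list that is not a pair is skipped here (Python raises ValueError there, outside Pre_)
def pvBuildA : List (List Int) → PySem.Dict Int (List Int) × Int → PySem.Dict Int (List Int) × Int
  | [], st => st
  | e :: rest, st =>
    match e with
    | [u, v] =>
      let t1 := st.1.insert u (st.1.getD u [] ++ [v])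
      let t2 := t1.insert v (t1.getD v [] ++ [u])
      let n1 := if u > st.2 then u else st.2
      let n2 := if v > n1 then v else n1
      pvBuildA rest (t2, n2)
    | _ => pvBuildA rest st

-- one neighbor step of A's BFS inner loop; pyGet? = none / out-of-range pySetD mean Python raised
-- IndexError (outside Pre_), where this total form leaves the state unchanged
def pvVisitA (node : Int) (st : List Int × List Bool × List Int × Int) (nb : Int) :
    List Int × List Bool × List Int × Int :=
  match PySem.List.pyGet? st.2.1 nb with
  | some false =>
      let vis' := PySem.List.pySetD st.2.1 nb true
      let dn := (PySem.List.pyGet? st.2.2.1 node).getD 0 + 1   -- depth[node] + 1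
      let dep' := PySem.List.pySetD st.2.2.1 nb dn
      (st.1 ++ [nb], vis', dep', max st.2.2.2 dn)
  | _ => st

-- needed for termination of A's BFS: a successful pyGet? names the set position
lemma pvGetSet {α : Type} (xs : List α) (i : Int) (b : α) (v : α)
    (h : PySem.List.pyGet? xs i = some b) :
    ∃ j : Nat, j < xs.length ∧ xs[j]? = some b ∧ PySem.List.pySetD xs i v = xs.set j v := by
  unfold PySem.List.pyGet? at h
  cases hj : PySem.List.pyIdx? xs.length i with
  | none => rw [hj] at h; simp at h
  | some j =>
    rw [hj] at h
    simp at h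
    refine ⟨j, ?_, h, ?_⟩
    · by_contra hc
      rw [List.getElem?_eq_none (by omega)] at h
      simp at h
    · unfold PySem.List.pySetD PySem.List.pySet?
      rw [hj]
      rfl

-- needed for termination of A's BFS: setting a False cell to True lowers the False count by one
lemma pvCountSet : ∀ (l : List Bool) (j : Nat), l[j]? = some false →
    l.count false = (l.set j true).count false + 1 := by
  intro l
  induction l with
  | nil => intro j h; simp at h
  | cons a l ih =>
    intro j h
    cases j with
    | zero =>
      simp at h
      subst h
      simp
    | succ j =>
      simp only [List.getElem?_cons_succ] at h
      rw [List.set_cons_succ]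
      simp only [List.count_cons]
      rw [ih j h]
      omega

-- the measure queue.length + (#False in visited) is preserved by A's inner loop
lemma pvVisitA_measure (node : Int) : ∀ (ns : List Int) (st : List Int × List Bool × List Int × Int),
    (ns.foldl (pvVisitA node) st).1.length + (ns.foldl (pvVisitA node) st).2.1.count false
      = st.1.length + st.2.1.count false := by
  intro ns
  induction ns with
  | nil => intro st; rfl
  | cons nb ns ih =>
    intro st
    rw [List.foldl_cons, ih]
    unfold pvVisitA
    cases hg : PySem.List.pyGet? st.2.1 nb with
    | none => simp
    | some b =>
      cases b with
      | true => simp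
      | false =>
        obtain ⟨j, hj, hjb, hset⟩ := pvGetSet st.2.1 nb false true hg
        simp only [hset, List.length_append, List.length_cons, List.length_nil]
        have := pvCountSet st.2.1 j hjb
        omega

def pvBfsA (tree : PySem.Dict Int (List Int)) : List Int → List Bool → List Int → Int → Int
  | [], _, _, m => m
  | node :: qs, vis, dep, m =>
    let st := (tree.getD node []).foldl (pvVisitA node) (qs, vis, dep, m)
    pvBfsA tree st.1 st.2.1 st.2.2.1 st.2.2.2
termination_by q vis _ _ => q.length + vis.count false
decreasing_by
  have := pvVisitA_measure node (tree.getD node []) (qs, vis, dep, m)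
  dsimp only at this
  simp only [List.length_cons]
  omega

def assignEdgeWeights (edges : List (List Int)) : Int :=
  let MOD : Int := 10 ^ 9 + 7
  let bn := pvBuildA edges (PySem.Dict.empty, 0)
  let dep := List.replicate (bn.2 + 1).toNat (0 : Int)
  let vis0 := List.replicate (bn.2 + 1).toNat false
  let vis := PySem.List.pySetD vis0 1 true      -- visited[1] = True (IndexError when n = 0, outside Pre_)
  let maxd := pvBfsA bn.1 [1] vis dep 0
  if maxd = 0 then 0 else PySem.Int.powMod 2 (maxd - 1).toNat MOD   -- pow(2, max_depth-1, MOD); max_depth ≥ 1 here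

-- ===== PORT B =====
-- one `if a in dist and (b not in dist or dist[a] + 1 < dist[b]): dist[b] = dist[a] + 1`
def pvRelax (d : PySem.Dict Int Int) (a b : Int) : PySem.Dict Int Int :=
  match d.get? a with
  | none => d
  | some da =>
    match d.get? b with
    | none => d.insert b (da + 1)
    | some db => if da + 1 < db then d.insert b (da + 1) else d

-- the `for a, b in ((u, v), (v, u))` body for one edge; a non-pair inner list makes Python's
-- unpacking raise ValueError (outside Pre_), where this total form leaves dist unchanged
def pvEdgeStep (d : PySem.Dict Int Int) (e : List Int) : PySem.Dict Int Int :=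
  match e with
  | [u, v] => pvRelax (pvRelax d u v) v u
  | _ => d

-- the `for u, v in edges` pass
def pvRound (edges : List (List Int)) (d : PySem.Dict Int Int) : PySem.Dict Int Int :=
  edges.foldl pvEdgeStep d

def assignEdgeWeights_alt (edges : List (List Int)) : Int :=
  let MOD : Int := 10 ^ 9 + 7
  let dist := (PySem.List.pyRange 0 (2 * (edges.length : Int)) 1).foldl
      (fun d _ => pvRound edges d) (PySem.Dict.ofList [(1, 0)])
  match PySem.List.max? dist.values (fun y => y) with   -- max(dist.values())
  | some m => if m = 0 then 0 else PySem.Int.powMod 2 (m - 1).toNat MOD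
  | none => 0   -- unreachable: dist always keeps the key 1 (Python max would raise on empty)

-- ===== PRECONDITION & SPEC =====
-- Pre_ keeps the problem's natural domain: well-formed pairs with nonnegative labels and at least one
-- label ≥ 1. It excludes malformed inner lists and all-nonpositive inputs (A raises ValueError /
-- IndexError there) and any input with a negative node label, where A either raises IndexError or
-- returns a value produced by accidental negative-index wraparound of visited[]/depth[].
def Pre_assignEdgeWeights (edges : List (List Int)) : Prop :=
  (∀ e ∈ edges, e.length = 2 ∧ ∀ x ∈ e, 0 ≤ x) ∧ (∃ e ∈ edges, ∃ x ∈ e, 1 ≤ x)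
instance (edges : List (List Int)) : Decidable (Pre_assignEdgeWeights edges) := by
  unfold Pre_assignEdgeWeights; infer_instance

def pvWitness_assignEdgeWeights : List (List Int) := [[1, 2], [1, 3], [3, 4]]

def Spec_assignEdgeWeights (edges : List (List Int)) (out : Int) : Prop := out = assignEdgeWeights_alt edges
instance (edges : List (List Int)) (out : Int) : Decidable (Spec_assignEdgeWeights edges out) := by unfold Spec_assignEdgeWeights; infer_instance

-- ===== CLAIM (what is proved, stated in full; the proofs are below) =====
def Claim_equal_assignEdgeWeights : Prop := ∀ (edges : List (List Int)), Dom_assignEdgeWeights edges → Pre_assignEdgeWeights edges → Spec_assignEdgeWeights edges (assignEdgeWeights edges)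

-- ===== LEMMAS AND PROOFS =====

theorem assignEdgeWeights_witness_ok :
    Dom_assignEdgeWeights pvWitness_assignEdgeWeights ∧ Pre_assignEdgeWeights pvWitness_assignEdgeWeights := by
  constructor <;> decide

-- ---------- shared graph semantics: the undirected edge relation and BFS balls ----------

def pvE (edges : List (List Int)) (u x : Int) : Prop := [u, x] ∈ edges ∨ [x, u] ∈ edges

def pvNodes (edges : List (List Int)) : List Int := 1 :: edges.flatten

-- pvBall k x: x is reachable from 1 in at most k edge steps
def pvBall (edges : List (List Int)) : Nat → Int → Prop
  | 0 => fun x => x = 1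
  | k+1 => fun x => pvBall edges k x ∨ ∃ u, pvBall edges k u ∧ pvE edges u x

def pvStable (edges : List (List Int)) (k : Nat) : Prop :=
  ∀ x, pvBall edges (k+1) x → pvBall edges k x

lemma pvBall_mono (edges : List (List Int)) (k : Nat) (x : Int) :
    pvBall edges k x → pvBall edges (k+1) x := Or.inl

lemma pvBall_mono_le (edges : List (List Int)) {k m : Nat} (h : k ≤ m) (x : Int) :
    pvBall edges k x → pvBall edges m x := by
  induction m with
  | zero => intro hx; have : k = 0 := by omega
            subst this; exact hx
  | succ m ih =>
    intro hx
    by_cases hk : k = m + 1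
    · subst hk; exact hx
    · exact pvBall_mono edges m x (ih (by omega) hx)

lemma pvStable_succ (edges : List (List Int)) (k : Nat) (h : pvStable edges k) :
    pvStable edges (k+1) := by
  intro x hx
  rcases hx with hx | ⟨u, hu, he⟩
  · exact hx
  · exact Or.inr ⟨u, h u hu, he⟩

lemma pvStable_ge (edges : List (List Int)) {k m : Nat} (hkm : k ≤ m) (h : pvStable edges k) :
    pvStable edges m := by
  induction m with
  | zero => have : k = 0 := by omega
            subst this; exact h
  | succ m ih =>
    by_cases hk : k = m + 1
    · subst hk; exact h
    · exact pvStable_succ edges m (ih (by omega))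

lemma pvBall_of_stable (edges : List (List Int)) (k : Nat) (h : pvStable edges k) :
    ∀ t x, pvBall edges (k + t) x → pvBall edges k x := by
  intro t
  induction t with
  | zero => intro x hx; exact hx
  | succ t ih =>
    intro x hx
    have hstab : pvStable edges (k + t) := pvStable_ge edges (Nat.le_add_right k t) h
    exact ih x (hstab x hx)

lemma pvBall_mem_nodes (edges : List (List Int)) :
    ∀ k x, pvBall edges k x → x ∈ pvNodes edges := by
  intro k
  induction k with
  | zero => intro x hx; rw [show x = 1 from hx]; exact List.mem_cons_self
  | succ k ih =>
    intro x hx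
    rcases hx with hx | ⟨u, _, he⟩
    · exact ih x hx
    · rcases he with he | he
      · exact List.mem_cons_of_mem _ (List.mem_flatten.2 ⟨[u, x], he, by simp⟩)
      · exact List.mem_cons_of_mem _ (List.mem_flatten.2 ⟨[x, u], he, by simp⟩)

noncomputable def pvBallSet (edges : List (List Int)) (k : Nat) : Finset Int :=
  @Finset.filter _ (fun x => pvBall edges k x) (Classical.decPred _) (pvNodes edges).toFinset

lemma pvBallSet_mem (edges : List (List Int)) (k : Nat) (x : Int) :
    x ∈ pvBallSet edges k ↔ x ∈ (pvNodes edges).toFinset ∧ pvBall edges k x :=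
  @Finset.mem_filter _ _ (Classical.decPred _) _ _

lemma pvBallSet_subset (edges : List (List Int)) (k : Nat) :
    pvBallSet edges k ⊆ pvBallSet edges (k+1) := by
  intro x hx
  obtain ⟨h1, h2⟩ := (pvBallSet_mem edges k x).1 hx
  exact (pvBallSet_mem edges (k+1) x).2 ⟨h1, pvBall_mono edges k x h2⟩

lemma pvBallSet_card_lb (edges : List (List Int)) :
    ∀ k, (∀ j < k, ¬ pvStable edges j) → k + 1 ≤ (pvBallSet edges k).card := by
  intro k
  induction k with
  | zero =>
    intro _
    refine Finset.card_pos.2 ⟨1, (pvBallSet_mem edges 0 1).2 ⟨?_, rfl⟩⟩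
    exact List.mem_toFinset.2 List.mem_cons_self
  | succ k ih =>
    intro h
    have hk := ih (fun j hj => h j (by omega))
    have hns : ¬ pvStable edges k := h k (by omega)
    rw [pvStable] at hns
    push_neg at hns
    obtain ⟨x, hb1, hb0⟩ := hns
    have hxmem : x ∈ pvBallSet edges (k+1) :=
      (pvBallSet_mem edges (k+1) x).2
        ⟨List.mem_toFinset.2 (pvBall_mem_nodes edges (k+1) x hb1), hb1⟩
    have hxnot : x ∉ pvBallSet edges k := by
      intro hx
      exact hb0 ((pvBallSet_mem edges k x).1 hx).2
    have hlt : (pvBallSet edges k).card < (pvBallSet edges (k+1)).card :=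
      Finset.card_lt_card
        ((Finset.ssubset_iff_of_subset (pvBallSet_subset edges k)).2 ⟨x, hxmem, hxnot⟩)
    omega

lemma pvFlatten_len (edges : List (List Int)) (hsh : ∀ e ∈ edges, e.length = 2) :
    edges.flatten.length = 2 * edges.length := by
  induction edges with
  | nil => simp
  | cons e rest ih =>
    rw [List.flatten_cons, List.length_append, List.length_cons,
      ih (fun e' he' => hsh e' (List.mem_cons_of_mem _ he')),
      hsh e List.mem_cons_self]
    ring

lemma pvExists_stable (edges : List (List Int)) (hsh : ∀ e ∈ edges, e.length = 2) :
    ∃ k, k ≤ 2 * edges.length ∧ pvStable edges k := by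
  by_contra hno
  push_neg at hno
  have hlb := pvBallSet_card_lb edges (2 * edges.length + 1)
    (fun j hj => hno j (by omega))
  have hsub : pvBallSet edges (2 * edges.length + 1) ⊆ (pvNodes edges).toFinset :=
    fun x hx => ((pvBallSet_mem edges _ x).1 hx).1
  have hub := Finset.card_le_card hsub
  have hub2 := List.toFinset_card_le (pvNodes edges)
  have hlen : (pvNodes edges).length = 2 * edges.length + 1 := by
    rw [show pvNodes edges = 1 :: edges.flatten from rfl, List.length_cons,
      pvFlatten_len edges hsh]
  omega


noncomputable def pvEcc (edges : List (List Int)) (h : ∃ k, pvStable edges k) : Nat :=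
  @Nat.find (fun k => pvStable edges k) (Classical.decPred _) h

lemma pvEcc_spec (edges : List (List Int)) (h : ∃ k, pvStable edges k) :
    pvStable edges (pvEcc edges h) :=
  @Nat.find_spec (fun k => pvStable edges k) (Classical.decPred _) h

lemma pvEcc_le (edges : List (List Int)) (h : ∃ k, pvStable edges k) {k : Nat}
    (hk : pvStable edges k) : pvEcc edges h ≤ k :=
  @Nat.find_min' (fun k => pvStable edges k) (Classical.decPred _) h k hk

lemma pvEcc_min (edges : List (List Int)) (h : ∃ k, pvStable edges k) {k : Nat}
    (hk : k < pvEcc edges h) : ¬ pvStable edges k :=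
  @Nat.find_min (fun k => pvStable edges k) (Classical.decPred _) h k hk

lemma pvBall_le_ecc (edges : List (List Int)) (h : ∃ k, pvStable edges k) :
    ∀ m x, pvBall edges m x → pvBall edges (pvEcc edges h) x := by
  intro m x hx
  by_cases hm : m ≤ pvEcc edges h
  · exact pvBall_mono_le edges hm x hx
  · exact pvBall_of_stable edges _ (pvEcc_spec edges h) (m - pvEcc edges h) x
      (by rwa [Nat.add_sub_cancel' (by omega)])

-- one build step adds exactly the two directed entries of one edge to the adjacency dict
lemma pvAdjStep (st : PySem.Dict Int (List Int)) (u v x y : Int) :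
    (y ∈ ((st.insert u (st.getD u [] ++ [v])).insert v
        ((st.insert u (st.getD u [] ++ [v])).getD v [] ++ [u])).getD x []
      ↔ y ∈ st.getD x [] ∨ (x = u ∧ y = v) ∨ (x = v ∧ y = u)) := by
  simp only [PySem.Dict.getD_insert, List.mem_append, List.mem_singleton]
  split_ifs <;> simp_all <;> tauto

lemma pvE_cons (u v : Int) (rest : List (List Int)) (x y : Int) :
    pvE ([u, v] :: rest) x y ↔ pvE rest x y ∨ (x = u ∧ y = v) ∨ (x = v ∧ y = u) := by
  simp only [pvE, List.mem_cons, List.cons.injEq, and_true]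
  tauto

lemma pvAdj_mem : ∀ (l : List (List Int)) (st : PySem.Dict Int (List Int) × Int)
    (x y : Int), (∀ e ∈ l, e.length = 2) →
    (y ∈ (pvBuildA l st).1.getD x [] ↔ y ∈ st.1.getD x [] ∨ pvE l x y) := by
  intro l
  induction l with
  | nil =>
    intro st x y _
    simp [pvBuildA, pvE]
  | cons e rest ih =>
    intro st x y hsh
    have hlen := hsh e List.mem_cons_self
    cases e with
    | nil => simp at hlen
    | cons u t =>
      cases t with
      | nil => simp at hlen
      | cons v t2 =>
        cases t2 with
        | cons w t3 => simp at hlen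
        | nil =>
          have hstep : pvBuildA ([u, v] :: rest) st
              = pvBuildA rest
                  ((st.1.insert u (st.1.getD u [] ++ [v])).insert v
                    (((st.1.insert u (st.1.getD u [] ++ [v])).getD v []) ++ [u]),
                   if v > (if u > st.2 then u else st.2) then v else (if u > st.2 then u else st.2)) := rfl
          rw [hstep, ih _ x y (fun e' he' => hsh e' (List.mem_cons_of_mem _ he'))]
          rw [show (((st.1.insert u (st.1.getD u [] ++ [v])).insert v
              (((st.1.insert u (st.1.getD u [] ++ [v])).getD v []) ++ [u]),
              if v > (if u > st.2 then u else st.2) then v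
              else (if u > st.2 then u else st.2)) :
              PySem.Dict Int (List Int) × Int).1
            = (st.1.insert u (st.1.getD u [] ++ [v])).insert v
              (((st.1.insert u (st.1.getD u [] ++ [v])).getD v []) ++ [u]) from rfl]
          rw [pvAdjStep, pvE_cons]
          tauto


-- ---------- A's level-structured BFS (proof-side model, carried over from its simulation) ----------

def pvVisitB (st : List Int × PySem.Set Int) (nb : Int) : List Int × PySem.Set Int :=
  if PySem.Set.contains st.2 nb then st else (st.1 ++ [nb], PySem.Set.add st.2 nb)

def pvNodeB (adj : PySem.Dict Int (List Int)) (st : List Int × PySem.Set Int) (node : Int) :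
    List Int × PySem.Set Int :=
  (adj.getD node []).foldl pvVisitB st

lemma pvGetDMemValues (adj : PySem.Dict Int (List Int)) (node : Int) :
    ∀ y ∈ adj.getD node [], y ∈ adj.values.flatten := by
  intro y hy
  unfold PySem.Dict.getD at hy
  cases hget : adj.get? node with
  | none => rw [hget] at hy; simp at hy
  | some l =>
    rw [hget] at hy
    simp at hy
    have hitem := PySem.Dict.mem_items_of_get?_eq_some _ hget
    have : l ∈ adj.values := by
      unfold PySem.Dict.values
      exact List.mem_map.2 ⟨(node, l), hitem, rfl⟩
    exact List.mem_flatten.2 ⟨l, this, hy⟩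

lemma pvNotMem (s : PySem.Set Int) (x : Int) : s.contains x = false ↔ x ∉ s := by
  constructor
  · intro h hm
    rw [(PySem.Set.contains_iff s x).2 hm] at h
    exact Bool.noConfusion h
  · intro h
    cases hc : s.contains x with
    | false => rfl
    | true => exact absurd ((PySem.Set.contains_iff s x).1 hc) h

lemma pvVisitB_grow (V : List Int) : ∀ (ns : List Int), (∀ y ∈ ns, y ∈ V) →
    ∀ (acc : List Int) (seen : PySem.Set Int),
      (∀ x, x ∈ seen → x ∈ (ns.foldl pvVisitB (acc, seen)).2) ∧
      (∀ x, x ∈ (ns.foldl pvVisitB (acc, seen)).1 →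
        x ∈ acc ∨ (x ∈ V ∧ x ∉ seen ∧ x ∈ (ns.foldl pvVisitB (acc, seen)).2)) := by
  intro ns
  induction ns with
  | nil => intro _ acc seen; exact ⟨fun x hx => hx, fun x hx => Or.inl hx⟩
  | cons nb ns ih =>
    intro hns acc seen
    rw [List.foldl_cons]
    by_cases hc : PySem.Set.contains seen nb = true
    · have hstep : pvVisitB (acc, seen) nb = (acc, seen) := by
        simp [pvVisitB, (PySem.Set.contains_iff seen nb).1 hc]
      rw [hstep]
      exact ih (fun y hy => hns y (List.mem_cons_of_mem _ hy)) acc seen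
    · have hcf : PySem.Set.contains seen nb = false := by
        revert hc; cases PySem.Set.contains seen nb <;> simp
      have hnbseen : nb ∉ seen := (pvNotMem seen nb).1 hcf
      have hstep : pvVisitB (acc, seen) nb = (acc ++ [nb], PySem.Set.add seen nb) := by
        simp [pvVisitB, hnbseen]
      rw [hstep]
      obtain ⟨hmono, hnew⟩ := ih (fun y hy => hns y (List.mem_cons_of_mem _ hy)) (acc ++ [nb]) (PySem.Set.add seen nb)
      refine ⟨fun x hx => hmono x ((PySem.Set.mem_add seen nb x).2 (Or.inl hx)), fun x hx => ?_⟩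
      rcases hnew x hx with hx' | ⟨hxV, hxs, hxr⟩
      · rcases List.mem_append.1 hx' with h | h
        · exact Or.inl h
        · have hxnb : x = nb := by simpa using h
          rw [hxnb]
          exact Or.inr ⟨hns nb (by simp), hnbseen,
            hmono nb ((PySem.Set.mem_add seen nb nb).2 (Or.inr rfl))⟩
      · exact Or.inr ⟨hxV, fun h => hxs ((PySem.Set.mem_add seen nb x).2 (Or.inl h)), hxr⟩

lemma pvFoldB_grow (adj : PySem.Dict Int (List Int)) :
    ∀ (fr : List Int) (acc : List Int) (seen : PySem.Set Int),
      (∀ x, x ∈ seen → x ∈ (fr.foldl (pvNodeB adj) (acc, seen)).2) ∧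
      (∀ x, x ∈ (fr.foldl (pvNodeB adj) (acc, seen)).1 →
        x ∈ acc ∨ (x ∈ adj.values.flatten ∧ x ∉ seen ∧ x ∈ (fr.foldl (pvNodeB adj) (acc, seen)).2)) := by
  intro fr
  induction fr with
  | nil => intro acc seen; exact ⟨fun x hx => hx, fun x hx => Or.inl hx⟩
  | cons node fr ih =>
    intro acc seen
    rw [List.foldl_cons]
    have hstep := pvVisitB_grow adj.values.flatten (adj.getD node [])
      (pvGetDMemValues adj node) acc seen
    have hrec := ih (pvNodeB adj (acc, seen) node).1 (pvNodeB adj (acc, seen) node).2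
    rw [show ((pvNodeB adj (acc, seen) node).1, (pvNodeB adj (acc, seen) node).2)
        = pvNodeB adj (acc, seen) node from rfl] at hrec
    unfold pvNodeB at hstep
    refine ⟨fun x hx => hrec.1 x (hstep.1 x hx), fun x hx => ?_⟩
    rcases hrec.2 x hx with hx' | ⟨hxV, hxs, hxr⟩
    · rcases hstep.2 x hx' with h | ⟨hV, hs, hr⟩
      · exact Or.inl h
      · exact Or.inr ⟨hV, hs, hrec.1 x hr⟩
    · refine Or.inr ⟨hxV, fun h => hxs (hstep.1 x h), hxr⟩

lemma pvFilterLe {α : Type} (p q : α → Bool) (hpq : ∀ a, q a = true → p a = true) :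
    ∀ l : List α, (l.filter q).length ≤ (l.filter p).length := by
  intro l
  induction l with
  | nil => simp
  | cons b l ihl =>
    by_cases hqb : q b = true
    · simp only [List.filter_cons, hqb, hpq b hqb, if_pos, List.length_cons]
      omega
    · rw [Bool.not_eq_true] at hqb
      by_cases hpb : p b = true <;>
        simp only [List.filter_cons, hqb, hpb, Bool.false_eq_true, if_neg, if_pos,
          not_false_iff, List.length_cons] <;> omega

lemma pvFilterLt {α : Type} (p q : α → Bool)
    (hpq : ∀ a, q a = true → p a = true) :
    ∀ (l : List α) (x : α), x ∈ l → p x = true → q x = false →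
    (l.filter q).length < (l.filter p).length := by
  intro l
  induction l with
  | nil => intro x hx; cases hx
  | cons a l ih =>
    intro x hx hpx hqx
    rcases List.mem_cons.1 hx with hx | hx
    · subst hx
      have := pvFilterLe p q hpq l
      simp only [List.filter_cons, hpx, hqx, Bool.false_eq_true, if_pos, if_neg,
        not_false_iff, List.length_cons]
      omega
    · have := ih x hx hpx hqx
      by_cases hqa : q a = true
      · simp only [List.filter_cons, hqa, hpq a hqa, if_pos, List.length_cons]
        omega
      · rw [Bool.not_eq_true] at hqa
        by_cases hpa : p a = true <;>
          simp only [List.filter_cons, hqa, hpa, Bool.false_eq_true, if_neg, if_pos,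
            not_false_iff, List.length_cons] <;> omega

def pvStepB (adj : PySem.Dict Int (List Int)) (seen : PySem.Set Int) (frontier : List Int) :
    List Int × PySem.Set Int :=
  frontier.foldl (pvNodeB adj) ([], seen)

def pvLevelsB (adj : PySem.Dict Int (List Int)) (seen : PySem.Set Int) (frontier : List Int)
    (levels : Int) : Int :=
  let r := pvStepB adj seen frontier
  if r.1 = [] then levels else pvLevelsB adj r.2 r.1 (levels + 1)
termination_by ((PySem.Set.ofList adj.values.flatten).filter
    (fun x => ! PySem.Set.contains seen x)).length
decreasing_by
  rename_i h
  obtain ⟨hmono, hnew⟩ := pvFoldB_grow adj frontier [] seen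
  obtain ⟨x0, hx0⟩ := List.exists_mem_of_ne_nil _ h
  rcases hnew x0 hx0 with hc | ⟨hV, hs, hr⟩
  · cases hc
  · refine pvFilterLt _ _ ?_ _ x0 ?_ ?_ ?_
    · intro a ha
      rw [Bool.not_eq_true'] at ha ⊢
      rw [pvNotMem] at ha ⊢
      exact fun hm => ha (hmono a hm)
    · exact (PySem.Set.mem_ofList _ _).2 hV
    · simp only [Bool.not_eq_true']
      rw [pvNotMem]
      exact hs
    · simp only [Bool.not_eq_eq_eq_not]
      rw [(PySem.Set.contains_iff _ _).2 (show x0 ∈ (pvStepB adj seen frontier).2 from hr)]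
      rfl

-- ---------- A's BFS equals the level loop (simulation, carried over) ----------

def pvR (n : Int) (vis : List Bool) (seen : PySem.Set Int) : Prop :=
  ∀ x : Int, 0 ≤ x → x ≤ n → (PySem.List.pyGet? vis x = some true ↔ x ∈ seen)

def pvLLF (adj : PySem.Dict Int (List Int)) (seen : PySem.Set Int) (rest acc : List Int)
    (lv : Int) : Int :=
  let r := rest.foldl (pvNodeB adj) (acc, seen)
  if r.1 = [] then lv else pvLevelsB adj r.2 r.1 (lv + 1)

lemma pvLLF_nil (adj : PySem.Dict Int (List Int)) (seen : PySem.Set Int) (f : List Int) (lv : Int) :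
    pvLevelsB adj seen f lv = pvLLF adj seen f [] lv := by
  rw [pvLevelsB]; rfl

lemma pvLLF_cons (adj : PySem.Dict Int (List Int)) (seen : PySem.Set Int) (h : Int)
    (rest acc : List Int) (lv : Int) :
    pvLLF adj seen (h :: rest) acc lv
      = pvLLF adj (pvNodeB adj (acc, seen) h).2 rest (pvNodeB adj (acc, seen) h).1 lv := by
  unfold pvLLF
  rw [List.foldl_cons]

lemma pvLLF_shift (adj : PySem.Dict Int (List Int)) (seen : PySem.Set Int) (acc : List Int)
    (lv : Int) (hacc : acc ≠ []) :
    pvLLF adj seen [] acc lv = pvLLF adj seen acc [] (lv + 1) := by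
  rw [← pvLLF_nil]
  unfold pvLLF
  simp only [List.foldl_nil]
  rw [if_neg hacc]

lemma pvToNatNe (x y : Int) (hx : 0 ≤ x) (hy : 0 ≤ y) (hne : x ≠ y) : x.toNat ≠ y.toNat := by
  omega

lemma pvInner (n k node : Int) (hnode0 : 0 ≤ node) (hnoden : node ≤ n) :
    ∀ (ns : List Int), (∀ y ∈ ns, 0 ≤ y ∧ y ≤ n) →
    ∀ (rest acc : List Int) (vis : List Bool) (dep : List Int) (m : Int) (seen : PySem.Set Int),
    vis.length = (n+1).toNat → dep.length = (n+1).toNat →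
    pvR n vis seen →
    node ∈ seen →
    PySem.List.pyGet? dep node = some k →
    (∀ x ∈ acc, (0 ≤ x ∧ x ≤ n) ∧ x ∈ seen) →
    (∀ x ∈ seen, 0 ≤ x ∧ x ≤ n) →
    ((ns.foldl (pvVisitA node) (rest ++ acc, vis, dep, m)).1 = rest ++ (ns.foldl pvVisitB (acc, seen)).1
     ∧ (ns.foldl (pvVisitA node) (rest ++ acc, vis, dep, m)).2.1.length = (n+1).toNat
     ∧ (ns.foldl (pvVisitA node) (rest ++ acc, vis, dep, m)).2.2.1.length = (n+1).toNat
     ∧ pvR n (ns.foldl (pvVisitA node) (rest ++ acc, vis, dep, m)).2.1 (ns.foldl pvVisitB (acc, seen)).2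
     ∧ (∀ x, x ∈ seen → x ∈ (ns.foldl pvVisitB (acc, seen)).2)
     ∧ (∀ x : Int, x ∈ seen → PySem.List.pyGet? (ns.foldl (pvVisitA node) (rest ++ acc, vis, dep, m)).2.2.1 x = PySem.List.pyGet? dep x)
     ∧ (∀ x ∈ (ns.foldl pvVisitB (acc, seen)).1, (0 ≤ x ∧ x ≤ n) ∧ x ∈ (ns.foldl pvVisitB (acc, seen)).2
          ∧ (x ∈ acc ∨ PySem.List.pyGet? (ns.foldl (pvVisitA node) (rest ++ acc, vis, dep, m)).2.2.1 x = some (k+1)))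
     ∧ acc <+: (ns.foldl pvVisitB (acc, seen)).1
     ∧ (∀ x ∈ (ns.foldl pvVisitB (acc, seen)).2, x ∈ seen ∨ (0 ≤ x ∧ x ≤ n))
     ∧ (ns.foldl (pvVisitA node) (rest ++ acc, vis, dep, m)).2.2.2 = (if (ns.foldl pvVisitB (acc, seen)).1 = acc then m else max m (k+1))) := by
  intro ns
  induction ns with
  | nil =>
    intro _ rest acc vis dep m seen hlv hld hR hnseen hdep hacc hseenbd
    refine ⟨rfl, hlv, hld, hR, fun x hx => hx, fun x _ => rfl, ?_, List.prefix_refl _,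
      fun x hx => Or.inl hx, by simp⟩
    intro x hx
    exact ⟨(hacc x hx).1, (hacc x hx).2, Or.inl hx⟩
  | cons nb ns ih =>
    intro hns rest acc vis dep m seen hlv hld hR hnseen hdep hacc hseenbd
    obtain ⟨hnb0, hnbn⟩ := hns nb (by simp)
    have hns' : ∀ y ∈ ns, 0 ≤ y ∧ y ≤ n := fun y hy => hns y (List.mem_cons_of_mem _ hy)
    rw [List.foldl_cons, List.foldl_cons]
    by_cases hmem : nb ∈ seen
    · have hgt : PySem.List.pyGet? vis nb = some true := (hR nb hnb0 hnbn).2 hmem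
      have hstepA : pvVisitA node (rest ++ acc, vis, dep, m) nb = (rest ++ acc, vis, dep, m) := by
        unfold pvVisitA
        rw [hgt]
      have hstepB : pvVisitB (acc, seen) nb = (acc, seen) := by
        simp [pvVisitB, hmem]
      rw [hstepA, hstepB]
      exact ih hns' rest acc vis dep m seen hlv hld hR hnseen hdep hacc hseenbd
    · have hrange : nb.toNat < vis.length := by rw [hlv]; omega
      have hgf : PySem.List.pyGet? vis nb = some false := by
        rw [PySem.List.pyGet?_of_nonneg vis hnb0]
        cases hval : vis[nb.toNat] with
        | true =>
          exfalso
          apply hmem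
          apply (hR nb hnb0 hnbn).1
          rw [PySem.List.pyGet?_of_nonneg vis hnb0, List.getElem?_eq_getElem hrange, hval]
        | false => rw [List.getElem?_eq_getElem hrange, hval]
      have hstepA : pvVisitA node (rest ++ acc, vis, dep, m) nb
          = (rest ++ (acc ++ [nb]), vis.set nb.toNat true, dep.set nb.toNat (k+1), max m (k+1)) := by
        unfold pvVisitA
        rw [hgf]
        rw [show ((rest ++ acc, vis, dep, m) : List Int × List Bool × List Int × Int).2.2.1 = dep from rfl]
        rw [hdep]
        simp [PySem.List.pySetD_of_nonneg, hnb0, List.append_assoc]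
      have hstepB : pvVisitB (acc, seen) nb = (acc ++ [nb], PySem.Set.add seen nb) := by
        simp [pvVisitB, hmem]
      rw [hstepA, hstepB]
      have hnenode : node ≠ nb := fun h => hmem (h ▸ hnseen)
      have hlv' : (vis.set nb.toNat true).length = (n+1).toNat := by rw [List.length_set]; exact hlv
      have hld' : (dep.set nb.toNat (k+1)).length = (n+1).toNat := by rw [List.length_set]; exact hld
      have hR' : pvR n (vis.set nb.toNat true) (PySem.Set.add seen nb) := by
        intro x hx0 hxn
        rw [PySem.List.pyGet?_of_nonneg _ hx0]
        by_cases hx1 : x = nb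
        · subst hx1
          rw [List.getElem?_set_self hrange]
          simp [PySem.Set.mem_add]
        · rw [List.getElem?_set_ne (pvToNatNe nb x hnb0 hx0 (fun h => hx1 h.symm))]
          rw [← PySem.List.pyGet?_of_nonneg _ hx0]
          rw [hR x hx0 hxn, PySem.Set.mem_add]
          constructor
          · exact Or.inl
          · intro h; rcases h with h | h
            · exact h
            · exact absurd h hx1
      have hnseen' : node ∈ PySem.Set.add seen nb := (PySem.Set.mem_add seen nb node).2 (Or.inl hnseen)
      have hdep' : PySem.List.pyGet? (dep.set nb.toNat (k+1)) node = some k := by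
        rw [PySem.List.pyGet?_of_nonneg _ hnode0,
          List.getElem?_set_ne (pvToNatNe nb node hnb0 hnode0 (fun h => hnenode h.symm)),
          ← PySem.List.pyGet?_of_nonneg _ hnode0]
        exact hdep
      have hacc' : ∀ x ∈ acc ++ [nb], (0 ≤ x ∧ x ≤ n) ∧ x ∈ PySem.Set.add seen nb := by
        intro x hx
        rcases List.mem_append.1 hx with hx | hx
        · exact ⟨(hacc x hx).1, (PySem.Set.mem_add seen nb x).2 (Or.inl (hacc x hx).2)⟩
        · have hxe : x = nb := by simpa using hx
          rw [hxe]
          exact ⟨⟨hnb0, hnbn⟩, (PySem.Set.mem_add seen nb nb).2 (Or.inr rfl)⟩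
      have hseenbd' : ∀ x ∈ PySem.Set.add seen nb, 0 ≤ x ∧ x ≤ n := by
        intro x hx
        rcases (PySem.Set.mem_add seen nb x).1 hx with hx | hx
        · exact hseenbd x hx
        · subst hx; exact ⟨hnb0, hnbn⟩
      obtain ⟨c1, c2, c3, c4, c5, c6, c7, c8, c9, c10⟩ :=
        ih hns' rest (acc ++ [nb]) (vis.set nb.toNat true) (dep.set nb.toNat (k+1))
          (max m (k+1)) (PySem.Set.add seen nb) hlv' hld' hR' hnseen' hdep' hacc' hseenbd'
      have hdeprange : nb.toNat < dep.length := by rw [hld]; omega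
      have hstab_nb : PySem.List.pyGet?
          (ns.foldl (pvVisitA node) (rest ++ (acc ++ [nb]), vis.set nb.toNat true, dep.set nb.toNat (k+1), max m (k+1))).2.2.1 nb
          = some (k+1) := by
        rw [c6 nb ((PySem.Set.mem_add seen nb nb).2 (Or.inr rfl))]
        rw [PySem.List.pyGet?_of_nonneg _ hnb0, List.getElem?_set_self hdeprange]
      refine ⟨c1, c2, c3, c4, ?_, ?_, ?_, ?_, ?_, ?_⟩
      · intro x hx
        exact c5 x ((PySem.Set.mem_add seen nb x).2 (Or.inl hx))
      · intro x hx
        have hxin := (PySem.Set.mem_add seen nb x).2 (Or.inl hx)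
        rw [c6 x hxin]
        obtain ⟨hx0, hxn⟩ := hseenbd x hx
        have hxne : x ≠ nb := fun h => hmem (h ▸ hx)
        rw [PySem.List.pyGet?_of_nonneg _ hx0,
          List.getElem?_set_ne (pvToNatNe nb x hnb0 hx0 (fun h => hxne h.symm)),
          ← PySem.List.pyGet?_of_nonneg _ hx0]
      · intro x hx
        obtain ⟨hbd, hmem2, hdisj⟩ := c7 x hx
        refine ⟨hbd, hmem2, ?_⟩
        rcases hdisj with hx' | hx'
        · rcases List.mem_append.1 hx' with h | h
          · exact Or.inl h
          · have : x = nb := by simpa using h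
            subst this
            exact Or.inr hstab_nb
        · exact Or.inr hx'
      · exact List.IsPrefix.trans (List.prefix_append acc [nb]) c8
      · intro x hx
        rcases c9 x hx with hx' | hx'
        · rcases (PySem.Set.mem_add seen nb x).1 hx' with h | h
          · exact Or.inl h
          · subst h; exact Or.inr ⟨hnb0, hnbn⟩
        · exact Or.inr hx'
      · rw [c10]
        have hne2 : (ns.foldl pvVisitB (acc ++ [nb], PySem.Set.add seen nb)).1 ≠ acc := by
          intro h
          have := c8.length_le
          rw [h] at this
          simp at this
        rw [if_neg hne2]
        by_cases hcase : (ns.foldl pvVisitB (acc ++ [nb], PySem.Set.add seen nb)).1 = acc ++ [nb]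
        · rw [if_pos hcase]
        · rw [if_neg hcase, max_assoc, max_self]

lemma pvMain (adj : PySem.Dict Int (List Int)) (n : Int)
    (hvals : ∀ node y, y ∈ adj.getD node [] → 0 ≤ y ∧ y ≤ n) :
    ∀ (μ : Nat) (rest acc : List Int) (vis : List Bool) (dep : List Int) (m k : Int)
      (seen : PySem.Set Int),
    (rest ++ acc).length + vis.count false ≤ μ →
    vis.length = (n+1).toNat → dep.length = (n+1).toNat →
    pvR n vis seen →
    (∀ x ∈ seen, 0 ≤ x ∧ x ≤ n) →
    (∀ x ∈ rest ++ acc, x ∈ seen) →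
    (∀ x ∈ rest, PySem.List.pyGet? dep x = some k) →
    (∀ x ∈ acc, PySem.List.pyGet? dep x = some (k+1)) →
    (m = if acc = [] then k else k + 1) →
    (rest = [] → acc = []) →
    pvBfsA adj (rest ++ acc) vis dep m = pvLLF adj seen rest acc k := by
  intro μ
  induction μ with
  | zero =>
    intro rest acc vis dep m k seen hμ _ _ _ _ _ _ _ hm _
    have hrest : rest = [] := by
      rw [← List.length_eq_zero_iff]
      simp only [List.length_append] at hμ
      omega
    have hacc : acc = [] := by
      rw [← List.length_eq_zero_iff]
      simp only [List.length_append] at hμ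
      omega
    subst hrest; subst hacc
    simp only [List.nil_append]
    rw [pvBfsA.eq_def, pvLLF]
    simp [hm]
  | succ μ ihμ =>
    intro rest acc vis dep m k seen hμ hlv hld hR hseenbd hq hdrest hdacc hm hra
    cases rest with
    | nil =>
      have hacc : acc = [] := hra rfl
      subst hacc
      simp only [List.nil_append]
      rw [pvBfsA.eq_def, pvLLF]
      simp [hm]
    | cons node rest' =>
      have hnodeseen : node ∈ seen := hq node (by simp)
      obtain ⟨hnode0, hnoden⟩ := hseenbd node hnodeseen
      have hdepnode := hdrest node (by simp)
      have hacc2 : ∀ x ∈ acc, (0 ≤ x ∧ x ≤ n) ∧ x ∈ seen := by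
        intro x hx
        have hxs : x ∈ seen := hq x (List.mem_append.2 (Or.inr hx))
        exact ⟨hseenbd x hxs, hxs⟩
      obtain ⟨c1, c2, c3, c4, c5, c6, c7, c8, c9, c10⟩ :=
        pvInner n k node hnode0 hnoden (adj.getD node []) (hvals node) rest' acc vis dep m seen
          hlv hld hR hnodeseen hdepnode hacc2 hseenbd
      have hmeas := pvVisitA_measure node (adj.getD node [])
        (rest' ++ acc, vis, dep, m)
      have hbfs : pvBfsA adj ((node :: rest') ++ acc) vis dep m
          = pvBfsA adj
              ((adj.getD node []).foldl (pvVisitA node) (rest' ++ acc, vis, dep, m)).1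
              ((adj.getD node []).foldl (pvVisitA node) (rest' ++ acc, vis, dep, m)).2.1
              ((adj.getD node []).foldl (pvVisitA node) (rest' ++ acc, vis, dep, m)).2.2.1
              ((adj.getD node []).foldl (pvVisitA node) (rest' ++ acc, vis, dep, m)).2.2.2 := by
        rw [List.cons_append, pvBfsA.eq_def]
      rw [hbfs, c1]
      have hllf : pvLLF adj seen (node :: rest') acc k
          = pvLLF adj ((adj.getD node []).foldl pvVisitB (acc, seen)).2 rest'
              ((adj.getD node []).foldl pvVisitB (acc, seen)).1 k := by
        rw [pvLLF_cons]
        rfl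
      rw [hllf]
      set FA := (adj.getD node []).foldl (pvVisitA node) (rest' ++ acc, vis, dep, m) with hFA
      set FB := (adj.getD node []).foldl pvVisitB (acc, seen) with hFB
      have hμ' : (rest' ++ FB.1).length + FA.2.1.count false ≤ μ := by
        have h1 : FA.1.length + FA.2.1.count false = (rest' ++ acc).length + vis.count false := hmeas
        rw [c1] at h1
        simp only [List.length_append, List.length_cons] at hμ h1 ⊢
        omega
      have hseenbd' : ∀ x ∈ FB.2, 0 ≤ x ∧ x ≤ n := by
        intro x hx
        rcases c9 x hx with h | h
        · exact hseenbd x h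
        · exact h
      have hq' : ∀ x ∈ rest' ++ FB.1, x ∈ FB.2 := by
        intro x hx
        rcases List.mem_append.1 hx with h | h
        · exact c5 x (hq x (by simp [h]))
        · exact (c7 x h).2.1
      have hdrest' : ∀ x ∈ rest', PySem.List.pyGet? FA.2.2.1 x = some k := by
        intro x hx
        rw [c6 x (hq x (by simp [hx]))]
        exact hdrest x (by simp [hx])
      have hdacc' : ∀ x ∈ FB.1, PySem.List.pyGet? FA.2.2.1 x = some (k+1) := by
        intro x hx
        rcases (c7 x hx).2.2 with h | h
        · rw [c6 x (hq x (List.mem_append.2 (Or.inr h)))]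
          exact hdacc x h
        · exact h
      have hm' : FA.2.2.2 = if FB.1 = [] then k else k + 1 := by
        rw [c10]
        by_cases hc : FB.1 = acc
        · rw [if_pos hc]
          by_cases ha : acc = []
          · rw [if_pos (hc.trans ha), hm, if_pos ha]
          · rw [if_neg (fun h => ha (hc.symm.trans h)), hm, if_neg ha]
        · rw [if_neg hc]
          have hne : FB.1 ≠ [] := by
            intro h
            have := c8
            rw [h] at this
            have := List.prefix_nil.1 this
            exact hc (h.trans this.symm)
          rw [if_neg hne]
          apply max_eq_right
          by_cases ha : acc = [] <;> rw [hm] <;> simp [ha]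
      by_cases hrest' : rest' = []
      · subst hrest'
        by_cases hfb : FB.1 = []
        · rw [hfb]
          simp only [List.nil_append]
          rw [pvBfsA.eq_def, pvLLF]
          simp [hm', hfb]
        · rw [pvLLF_shift adj FB.2 FB.1 k hfb]
          rw [show ([] : List Int) ++ FB.1 = FB.1 ++ ([] : List Int) from by simp]
          apply ihμ (FB.1) [] FA.2.1 FA.2.2.1 FA.2.2.2 (k+1) FB.2
          · simpa using hμ'
          · exact c2
          · exact c3
          · exact c4
          · exact hseenbd'
          · intro x hx; exact hq' x (by simpa using hx)
          · exact hdacc'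
          · intro x hx; cases hx
          · rw [hm', if_neg hfb]
            simp
          · intro _; rfl
      · apply ihμ rest' FB.1 FA.2.1 FA.2.2.1 FA.2.2.2 k FB.2
        · exact hμ'
        · exact c2
        · exact c3
        · exact c4
        · exact hseenbd'
        · exact hq'
        · exact hdrest'
        · exact hdacc'
        · exact hm'
        · intro h; exact absurd h hrest'

lemma pvBuildA_mono : ∀ (edges : List (List Int)) (st : PySem.Dict Int (List Int) × Int),
    st.2 ≤ (pvBuildA edges st).2 := by
  intro edges
  induction edges with
  | nil => intro st; exact le_refl _
  | cons e rest ih =>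
    intro st
    cases e with
    | nil => exact ih st
    | cons u t =>
      cases t with
      | nil => exact ih st
      | cons v t2 =>
        cases t2 with
        | nil =>
          refine le_trans ?_ (ih _)
          simp only []
          split_ifs <;> omega
        | cons w t3 => exact ih st

lemma pvBuildA_bounds : ∀ (edges : List (List Int)) (st : PySem.Dict Int (List Int) × Int),
    (∀ e ∈ edges, e.length = 2 ∧ ∀ x ∈ e, 0 ≤ x) →
    0 ≤ st.2 → (∀ node y, y ∈ st.1.getD node [] → 0 ≤ y ∧ y ≤ st.2) →
    0 ≤ (pvBuildA edges st).2 ∧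
      (∀ node y, y ∈ (pvBuildA edges st).1.getD node [] → 0 ≤ y ∧ y ≤ (pvBuildA edges st).2) := by
  intro edges
  induction edges with
  | nil => intro st _ h0 hv; exact ⟨h0, hv⟩
  | cons e rest ih =>
    intro st hsh h0 hv
    have hsh' : ∀ e' ∈ rest, e'.length = 2 ∧ ∀ x ∈ e', 0 ≤ x :=
      fun e' he' => hsh e' (List.mem_cons_of_mem _ he')
    obtain ⟨hlen, hpos⟩ := hsh e List.mem_cons_self
    cases e with
    | nil => simp at hlen
    | cons u t =>
      cases t with
      | nil => simp at hlen
      | cons v t2 =>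
        cases t2 with
        | cons w t3 => simp at hlen
        | nil =>
          have hu0 : 0 ≤ u := hpos u (by simp)
          have hv0 : 0 ≤ v := hpos v (by simp)
          apply ih
          · exact hsh'
          · simp only []
            split_ifs <;> omega
          · intro node y hy
            simp only [] at hy
            rw [PySem.Dict.getD_insert] at hy
            by_cases hnv : node = v
            · rw [if_pos hnv] at hy
              rcases List.mem_append.1 hy with hy | hy
              · rw [PySem.Dict.getD_insert] at hy
                by_cases hnu : v = u
                · rw [if_pos hnu] at hy
                  rcases List.mem_append.1 hy with hy | hy
                  · obtain ⟨hy0, hy2⟩ := hv node y (by rw [hnv, hnu]; exact hy)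
                    refine ⟨hy0, le_trans hy2 ?_⟩
                    split_ifs <;> omega
                  · have : y = v := by simpa using hy
                    subst this
                    constructor
                    · exact hv0
                    · split_ifs <;> omega
                · rw [if_neg hnu] at hy
                  obtain ⟨hy0, hy2⟩ := hv v y hy
                  refine ⟨hy0, le_trans hy2 ?_⟩
                  split_ifs <;> omega
              · have : y = u := by simpa using hy
                subst this
                constructor
                · exact hu0
                · split_ifs <;> omega
            · rw [if_neg hnv] at hy
              rw [PySem.Dict.getD_insert] at hy
              by_cases hnu : node = u
              · rw [if_pos hnu] at hy
                rcases List.mem_append.1 hy with hy | hy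
                · obtain ⟨hy0, hy2⟩ := hv u y hy
                  refine ⟨hy0, le_trans hy2 ?_⟩
                  split_ifs <;> omega
                · have : y = v := by simpa using hy
                  subst this
                  constructor
                  · exact hv0
                  · split_ifs <;> omega
              · rw [if_neg hnu] at hy
                obtain ⟨hy0, hy2⟩ := hv node y hy
                refine ⟨hy0, le_trans hy2 ?_⟩
                split_ifs <;> omega

lemma pvBuildA_ge : ∀ (edges : List (List Int)) (st : PySem.Dict Int (List Int) × Int),
    (∀ e ∈ edges, e.length = 2) →
    ∀ e ∈ edges, ∀ x ∈ e, x ≤ (pvBuildA edges st).2 := by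
  intro edges
  induction edges with
  | nil => intro st _ e he; cases he
  | cons e0 rest ih =>
    intro st hsh e he x hx
    have hlen := hsh e0 List.mem_cons_self
    cases e0 with
    | nil => simp at hlen
    | cons u t =>
      cases t with
      | nil => simp at hlen
      | cons v t2 =>
        cases t2 with
        | cons w t3 => simp at hlen
        | nil =>
          rcases List.mem_cons.1 he with he | he
          · subst he
            have hmono := pvBuildA_mono rest
              ((st.1.insert u (st.1.getD u [] ++ [v])).insert v
                ((st.1.insert u (st.1.getD u [] ++ [v])).getD v [] ++ [u]),
               if v > (if u > st.2 then u else st.2) then v else (if u > st.2 then u else st.2))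
            rcases List.mem_cons.1 hx with hx | hx
            · subst hx
              refine le_trans ?_ hmono
              simp only []
              split_ifs <;> omega
            · have : x = v := by simpa using hx
              subst this
              refine le_trans ?_ hmono
              simp only []
              split_ifs <;> omega
          · exact ih _ (fun e' he' => hsh e' (List.mem_cons_of_mem _ he')) e he x hx


def pvFspec (edges : List (List Int)) : Nat → Int → Prop
  | 0 => fun x => x = 1
  | k+1 => fun x => pvBall edges (k+1) x ∧ ¬ pvBall edges k x

lemma pvFspec_ball (edges : List (List Int)) (k : Nat) (x : Int) :
    pvFspec edges k x → pvBall edges k x := by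
  cases k with
  | zero => intro h; exact h
  | succ k => intro h; exact h.1

-- inner fold of one frontier node: seen grows by the neighbor list, new ones are appended
lemma pvInnerChar (ns : List Int) :
    ∀ (acc : List Int) (seen : PySem.Set Int), (∀ x ∈ acc, x ∈ seen) →
      (∀ x, x ∈ (ns.foldl pvVisitB (acc, seen)).2 ↔ x ∈ seen ∨ x ∈ ns) ∧
      (∀ x, x ∈ (ns.foldl pvVisitB (acc, seen)).1 ↔ x ∈ acc ∨ (x ∈ ns ∧ x ∉ seen)) ∧
      (∀ x ∈ (ns.foldl pvVisitB (acc, seen)).1, x ∈ (ns.foldl pvVisitB (acc, seen)).2) := by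
  induction ns with
  | nil =>
    intro acc seen hacc
    refine ⟨fun x => by simp, fun x => by simp, fun x hx => hacc x hx⟩
  | cons nb ns ih =>
    intro acc seen hacc
    rw [List.foldl_cons]
    by_cases hmem : nb ∈ seen
    · have hstep : pvVisitB (acc, seen) nb = (acc, seen) := by
        simp [pvVisitB, hmem]
      rw [hstep]
      obtain ⟨h2, h1, h12⟩ := ih acc seen hacc
      refine ⟨fun x => ?_, fun x => ?_, h12⟩
      · rw [h2 x, List.mem_cons]
        constructor
        · rintro (h | h)
          · exact Or.inl h
          · exact Or.inr (Or.inr h)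
        · rintro (h | h | h)
          · exact Or.inl h
          · rw [h]; exact Or.inl hmem
          · exact Or.inr h
      · rw [h1 x, List.mem_cons]
        constructor
        · rintro (h | ⟨h, hn⟩)
          · exact Or.inl h
          · exact Or.inr ⟨Or.inr h, hn⟩
        · rintro (h | ⟨h | h, hn⟩)
          · exact Or.inl h
          · rw [h] at hn; exact absurd hmem hn
          · exact Or.inr ⟨h, hn⟩
    · have hstep : pvVisitB (acc, seen) nb = (acc ++ [nb], PySem.Set.add seen nb) := by
        simp [pvVisitB, hmem]
      rw [hstep]
      have hacc' : ∀ x ∈ acc ++ [nb], x ∈ PySem.Set.add seen nb := by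
        intro x hx
        rcases List.mem_append.1 hx with h | h
        · exact (PySem.Set.mem_add seen nb x).2 (Or.inl (hacc x h))
        · exact (PySem.Set.mem_add seen nb x).2 (Or.inr (by simpa using h))
      obtain ⟨h2, h1, h12⟩ := ih (acc ++ [nb]) (PySem.Set.add seen nb) hacc'
      refine ⟨fun x => ?_, fun x => ?_, h12⟩
      · rw [h2 x, PySem.Set.mem_add, List.mem_cons]
        tauto
      · rw [h1 x]
        constructor
        · rintro (h | ⟨h, hn⟩)
          · rcases List.mem_append.1 h with h' | h'
            · exact Or.inl h'
            · have hxnb : x = nb := by simpa using h'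
              subst hxnb
              exact Or.inr ⟨List.mem_cons_self, hmem⟩
          · exact Or.inr ⟨List.mem_cons_of_mem _ h,
              fun hs => hn ((PySem.Set.mem_add seen nb x).2 (Or.inl hs))⟩
        · rintro (h | ⟨h, hn⟩)
          · exact Or.inl (List.mem_append.2 (Or.inl h))
          · rcases List.mem_cons.1 h with h' | h'
            · subst h'
              exact Or.inl (List.mem_append.2 (Or.inr (by simp)))
            · by_cases hxnb : x = nb
              · subst hxnb
                exact Or.inl (List.mem_append.2 (Or.inr (by simp)))
              · refine Or.inr ⟨h', fun hs => ?_⟩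
                rcases (PySem.Set.mem_add seen nb x).1 hs with hs | hs
                · exact hn hs
                · exact hxnb hs

lemma pvOuterChar (adj : PySem.Dict Int (List Int)) :
    ∀ (F : List Int) (acc : List Int) (seen : PySem.Set Int), (∀ x ∈ acc, x ∈ seen) →
      (∀ x, x ∈ (F.foldl (pvNodeB adj) (acc, seen)).2 ↔ x ∈ seen ∨ ∃ u ∈ F, x ∈ adj.getD u []) ∧
      (∀ x, x ∈ (F.foldl (pvNodeB adj) (acc, seen)).1 ↔
        x ∈ acc ∨ ((∃ u ∈ F, x ∈ adj.getD u []) ∧ x ∉ seen)) ∧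
      (∀ x ∈ (F.foldl (pvNodeB adj) (acc, seen)).1, x ∈ (F.foldl (pvNodeB adj) (acc, seen)).2) := by
  intro F
  induction F with
  | nil =>
    intro acc seen hacc
    refine ⟨fun x => by simp, fun x => by simp, fun x hx => hacc x hx⟩
  | cons node F ih =>
    intro acc seen hacc
    rw [List.foldl_cons]
    obtain ⟨g2, g1, g12⟩ := pvInnerChar (adj.getD node []) acc seen hacc
    have hstep : pvNodeB adj (acc, seen) node = ((adj.getD node []).foldl pvVisitB (acc, seen)) := rfl
    rw [hstep]
    set r1 := (adj.getD node []).foldl pvVisitB (acc, seen) with hr1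
    have hacc1 : ∀ x ∈ r1.1, x ∈ r1.2 := g12
    have hpair : (r1.1, r1.2) = r1 := rfl
    obtain ⟨h2, h1, h12⟩ := ih r1.1 r1.2 hacc1
    rw [hpair] at h2 h1 h12
    refine ⟨fun x => ?_, fun x => ?_, h12⟩
    · rw [h2 x, g2 x]
      constructor
      · rintro ((h | h) | ⟨u, hu, hx⟩)
        · exact Or.inl h
        · exact Or.inr ⟨node, by simp, h⟩
        · exact Or.inr ⟨u, List.mem_cons_of_mem _ hu, hx⟩
      · rintro (h | ⟨u, hu, hx⟩)
        · exact Or.inl (Or.inl h)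
        · rcases List.mem_cons.1 hu with hu | hu
          · exact Or.inl (Or.inr (hu ▸ hx))
          · exact Or.inr ⟨u, hu, hx⟩
    · rw [h1 x, g1 x, g2 x]
      constructor
      · rintro ((h | ⟨h, hn⟩) | ⟨⟨u, hu, hx⟩, hn⟩)
        · exact Or.inl h
        · exact Or.inr ⟨⟨node, by simp, h⟩, hn⟩
        · exact Or.inr ⟨⟨u, List.mem_cons_of_mem _ hu, hx⟩,
            fun hs => hn (Or.inl hs)⟩
      · rintro (h | ⟨⟨u, hu, hx⟩, hn⟩)
        · exact Or.inl (Or.inl h)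
        · rcases List.mem_cons.1 hu with hu | hu
          · exact Or.inl (Or.inr ⟨hu ▸ hx, hn⟩)
          · by_cases hxr : x ∈ adj.getD node []
            · exact Or.inl (Or.inr ⟨hxr, hn⟩)
            · exact Or.inr ⟨⟨u, hu, hx⟩, fun hs => by
                rcases hs with hs | hs
                · exact hn hs
                · exact hxr hs⟩

lemma pvBall_succ_front (edges : List (List Int)) (k : Nat) (x : Int) :
    pvBall edges (k+1) x ↔ pvBall edges k x ∨ ∃ u, pvFspec edges k u ∧ pvE edges u x := by
  constructor
  · rintro (h | ⟨u, hu, he⟩)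
    · exact Or.inl h
    · cases k with
      | zero => exact Or.inr ⟨u, hu, he⟩
      | succ k =>
        by_cases hk : pvBall edges k u
        · exact Or.inl (Or.inr ⟨u, hk, he⟩)
        · exact Or.inr ⟨u, ⟨hu, hk⟩, he⟩
  · rintro (h | ⟨u, hu, he⟩)
    · exact Or.inl h
    · exact Or.inr ⟨u, pvFspec_ball edges k u hu, he⟩

lemma pvLevels_ecc (edges : List (List Int)) (adj : PySem.Dict Int (List Int))
    (hadj : ∀ x y, y ∈ adj.getD x [] ↔ pvE edges x y) (hex : ∃ k, pvStable edges k) :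
    ∀ (t K : Nat) (seen : PySem.Set Int) (F : List Int),
    pvEcc edges hex - K = t →
    (∀ x, x ∈ seen ↔ pvBall edges K x) →
    (∀ x, x ∈ F ↔ pvFspec edges K x) →
    K ≤ pvEcc edges hex →
    pvLevelsB adj seen F (K : Int) = (pvEcc edges hex : Int) := by
  intro t
  induction t with
  | zero =>
    intro K seen F ht hseen hF hK
    have hKe : K = pvEcc edges hex := by omega
    have hstab : pvStable edges K := hKe ▸ pvEcc_spec edges hex
    rw [pvLevelsB]
    obtain ⟨h2, h1, _⟩ := pvOuterChar adj F [] seen (fun x hx => by cases hx)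
    have hempty : (pvStepB adj seen F).1 = [] := by
      rw [List.eq_nil_iff_forall_not_mem]
      intro x hx
      rcases (h1 x).1 hx with h | ⟨⟨u, hu, hxadj⟩, hn⟩
      · cases h
      · have hball : pvBall edges (K+1) x := by
          rw [pvBall_succ_front]
          exact Or.inr ⟨u, (hF u).1 hu, (hadj u x).1 hxadj⟩
        exact hn ((hseen x).2 (hstab x hball))
    rw [if_pos hempty, hKe]
  | succ t iht =>
    intro K seen F ht hseen hF hK
    have hKlt : K < pvEcc edges hex := by omega
    have hnstab : ¬ pvStable edges K := pvEcc_min edges hex hKlt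
    rw [pvLevelsB]
    obtain ⟨h2, h1, _⟩ := pvOuterChar adj F [] seen (fun x hx => by cases hx)
    have hseen' : ∀ x, x ∈ (pvStepB adj seen F).2 ↔ pvBall edges (K+1) x := by
      intro x
      rw [show (pvStepB adj seen F).2 = (F.foldl (pvNodeB adj) ([], seen)).2 from rfl, h2 x]
      rw [pvBall_succ_front]
      constructor
      · rintro (h | ⟨u, hu, hx⟩)
        · exact Or.inl ((hseen x).1 h)
        · exact Or.inr ⟨u, (hF u).1 hu, (hadj u x).1 hx⟩
      · rintro (h | ⟨u, hu, hx⟩)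
        · exact Or.inl ((hseen x).2 h)
        · exact Or.inr ⟨u, (hF u).2 hu, (hadj u x).2 hx⟩
    have hF' : ∀ x, x ∈ (pvStepB adj seen F).1 ↔ pvFspec edges (K+1) x := by
      intro x
      rw [show (pvStepB adj seen F).1 = (F.foldl (pvNodeB adj) ([], seen)).1 from rfl, h1 x]
      show _ ↔ pvBall edges (K+1) x ∧ ¬ pvBall edges K x
      constructor
      · rintro (h | ⟨⟨u, hu, hx⟩, hn⟩)
        · cases h
        · refine ⟨?_, fun hb => hn ((hseen x).2 hb)⟩
          rw [pvBall_succ_front]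
          exact Or.inr ⟨u, (hF u).1 hu, (hadj u x).1 hx⟩
      · rintro ⟨hb, hn⟩
        rw [pvBall_succ_front] at hb
        rcases hb with hb | ⟨u, hu, he⟩
        · exact absurd hb hn
        · exact Or.inr ⟨⟨u, (hF u).2 hu, (hadj u x).2 he⟩, fun hs => hn ((hseen x).1 hs)⟩
    have hnonempty : (pvStepB adj seen F).1 ≠ [] := by
      intro hnil
      apply hnstab
      intro x hball
      by_contra hxK
      have : x ∈ (pvStepB adj seen F).1 := (hF' x).2 ⟨hball, hxK⟩
      rw [hnil] at this
      cases this
    rw [if_neg hnonempty]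
    have := iht (K+1) (pvStepB adj seen F).2 (pvStepB adj seen F).1
      (by omega) hseen' hF' (by omega)
    rw [show ((K : Int) + 1) = ((K+1 : Nat) : Int) from by push_cast; ring]
    exact this


def pvD0 : PySem.Dict Int Int := PySem.Dict.ofList [(1, 0)]

def pvRounds (edges : List (List Int)) : Nat → PySem.Dict Int Int
  | 0 => pvD0
  | r+1 => pvRound edges (pvRounds edges r)

def pvSound (edges : List (List Int)) (d : PySem.Dict Int Int) : Prop :=
  ∀ v k, d.get? v = some k → 0 ≤ k ∧ pvBall edges k.toNat v

def pvLe (d d' : PySem.Dict Int Int) : Prop :=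
  ∀ v k, d.get? v = some k → ∃ k', d'.get? v = some k' ∧ k' ≤ k

lemma pvLe_refl (d : PySem.Dict Int Int) : pvLe d d :=
  fun v k h => ⟨k, h, le_refl k⟩

lemma pvLe_trans {d1 d2 d3 : PySem.Dict Int Int} (h1 : pvLe d1 d2) (h2 : pvLe d2 d3) :
    pvLe d1 d3 := by
  intro v k h
  obtain ⟨k', h', hle'⟩ := h1 v k h
  obtain ⟨k'', h'', hle''⟩ := h2 v k' h'
  exact ⟨k'', h'', le_trans hle'' hle'⟩

-- branch equations for pvRelax (the four outcomes of B's if)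
lemma pvRelax_of_none {d : PySem.Dict Int Int} {a : Int} (b : Int) (h : d.get? a = none) :
    pvRelax d a b = d := by
  unfold pvRelax; rw [h]

lemma pvRelax_of_new {d : PySem.Dict Int Int} {a b da : Int}
    (ha : d.get? a = some da) (hb : d.get? b = none) :
    pvRelax d a b = d.insert b (da + 1) := by
  unfold pvRelax; rw [ha, hb]

lemma pvRelax_of_lt {d : PySem.Dict Int Int} {a b da db : Int}
    (ha : d.get? a = some da) (hb : d.get? b = some db) (hlt : da + 1 < db) :
    pvRelax d a b = d.insert b (da + 1) := by
  unfold pvRelax; simp only [ha, hb]; rw [if_pos hlt]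

lemma pvRelax_of_ge {d : PySem.Dict Int Int} {a b da db : Int}
    (ha : d.get? a = some da) (hb : d.get? b = some db) (hlt : ¬ da + 1 < db) :
    pvRelax d a b = d := by
  unfold pvRelax; simp only [ha, hb]; rw [if_neg hlt]

lemma pvLe_relax (d : PySem.Dict Int Int) (a b : Int) : pvLe d (pvRelax d a b) := by
  cases hga : d.get? a with
  | none => rw [pvRelax_of_none b hga]; exact pvLe_refl d
  | some da =>
    cases hgb : d.get? b with
    | none =>
      rw [pvRelax_of_new hga hgb]
      intro v k h
      have hvb : v ≠ b := fun hv => by rw [hv, hgb] at h; cases h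
      exact ⟨k, by rw [PySem.Dict.get?_insert_of_ne _ _ hvb]; exact h, le_refl k⟩
    | some db =>
      by_cases hlt : da + 1 < db
      · rw [pvRelax_of_lt hga hgb hlt]
        intro v k h
        by_cases hvb : v = b
        · subst hvb
          rw [hgb] at h
          exact ⟨da + 1, PySem.Dict.get?_insert_self _ _ _, by
            injection h with h; omega⟩
        · exact ⟨k, by rw [PySem.Dict.get?_insert_of_ne _ _ hvb]; exact h, le_refl k⟩
      · rw [pvRelax_of_ge hga hgb hlt]; exact pvLe_refl d

lemma pvRelax_bound (d : PySem.Dict Int Int) (a b : Int) (ka : Int)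
    (ha : d.get? a = some ka) :
    ∃ kb, (pvRelax d a b).get? b = some kb ∧ kb ≤ ka + 1 := by
  cases hgb : d.get? b with
  | none =>
    rw [pvRelax_of_new ha hgb]
    exact ⟨ka + 1, PySem.Dict.get?_insert_self _ _ _, le_refl _⟩
  | some db =>
    by_cases hlt : ka + 1 < db
    · rw [pvRelax_of_lt ha hgb hlt]
      exact ⟨ka + 1, PySem.Dict.get?_insert_self _ _ _, le_refl _⟩
    · rw [pvRelax_of_ge ha hgb hlt]
      exact ⟨db, hgb, by omega⟩

lemma pvLe_edgeStep (d : PySem.Dict Int Int) (e : List Int) : pvLe d (pvEdgeStep d e) := by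
  unfold pvEdgeStep
  match e with
  | [] => exact pvLe_refl d
  | [u] => exact pvLe_refl d
  | [u, v] => exact pvLe_trans (pvLe_relax d u v) (pvLe_relax _ v u)
  | u :: v :: w :: t => exact pvLe_refl d

lemma pvLe_fold (l : List (List Int)) : ∀ d, pvLe d (l.foldl pvEdgeStep d) := by
  induction l with
  | nil => intro d; exact pvLe_refl d
  | cons e l ih =>
    intro d
    rw [List.foldl_cons]
    exact pvLe_trans (pvLe_edgeStep d e) (ih _)

lemma pvLe_rounds (edges : List (List Int)) {r r' : Nat} (h : r ≤ r') :
    pvLe (pvRounds edges r) (pvRounds edges r') := by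
  induction r' with
  | zero => have : r = 0 := by omega
            subst this; exact pvLe_refl _
  | succ r' ih =>
    by_cases hr : r = r' + 1
    · subst hr; exact pvLe_refl _
    · exact pvLe_trans (ih (by omega)) (pvLe_fold edges _)

lemma pvSound_relax (edges : List (List Int)) (d : PySem.Dict Int Int) (a b : Int)
    (hab : pvE edges a b) (hs : pvSound edges d) : pvSound edges (pvRelax d a b) := by
  cases hga : d.get? a with
  | none => rw [pvRelax_of_none b hga]; exact hs
  | some da =>
    obtain ⟨hda0, hball⟩ := hs a da hga
    have hins : pvSound edges (d.insert b (da + 1)) := by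
      intro v k h
      by_cases hvb : v = b
      · subst hvb
        rw [PySem.Dict.get?_insert_self] at h
        injection h with h
        subst h
        refine ⟨by omega, ?_⟩
        have : (da + 1).toNat = da.toNat + 1 := by omega
        rw [this]
        exact Or.inr ⟨a, hball, hab⟩
      · rw [PySem.Dict.get?_insert_of_ne _ _ hvb] at h
        exact hs v k h
    cases hgb : d.get? b with
    | none => rw [pvRelax_of_new hga hgb]; exact hins
    | some db =>
      by_cases hlt : da + 1 < db
      · rw [pvRelax_of_lt hga hgb hlt]; exact hins
      · rw [pvRelax_of_ge hga hgb hlt]; exact hs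

lemma pvSound_fold (edges : List (List Int)) :
    ∀ (l : List (List Int)), (∀ e ∈ l, e ∈ edges) →
    ∀ d, pvSound edges d → pvSound edges (l.foldl pvEdgeStep d) := by
  intro l
  induction l with
  | nil => intro _ d hd; exact hd
  | cons e l ih =>
    intro hl d hd
    rw [List.foldl_cons]
    refine ih (fun e' he' => hl e' (List.mem_cons_of_mem _ he')) _ ?_
    have he : e ∈ edges := hl e List.mem_cons_self
    unfold pvEdgeStep
    match e, he with
    | [], _ => exact hd
    | [u], _ => exact hd
    | [u, v], he =>
      exact pvSound_relax edges _ v u (Or.inr he) (pvSound_relax edges d u v (Or.inl he) hd)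
    | u :: v :: w :: t, _ => exact hd

lemma pvD0_get? (v : Int) : pvD0.get? v = if (1 : Int) = v then some 0 else none := by
  rw [show pvD0 = PySem.Dict.mk [(1, 0)] from rfl, PySem.Dict.get?_mk_cons]
  by_cases h : (1 : Int) = v
  · simp [h]
  · rw [if_neg (by simp [h]), if_neg h]
    rfl

lemma pvSound_rounds (edges : List (List Int)) (r : Nat) :
    pvSound edges (pvRounds edges r) := by
  induction r with
  | zero =>
    intro v k h
    rw [show pvRounds edges 0 = pvD0 from rfl, pvD0_get?] at h
    split_ifs at h with h1
    injection h with h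
    subst h
    exact ⟨le_refl 0, by rw [← h1]; exact rfl⟩
  | succ r ih =>
    exact pvSound_fold edges edges (fun e he => he) _ ih

lemma pvComplete (edges : List (List Int)) :
    ∀ (r : Nat) (v : Int), pvBall edges r v →
    ∃ k, (pvRounds edges r).get? v = some k ∧ k ≤ (r : Int) := by
  intro r
  induction r with
  | zero =>
    intro v hv
    rw [show v = 1 from hv]
    exact ⟨0, by rw [show pvRounds edges 0 = pvD0 from rfl, pvD0_get?]; simp, le_refl 0⟩
  | succ r ih =>
    intro v hv
    rcases hv with hv | ⟨u, hu, he⟩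
    · obtain ⟨k, hk, hle⟩ := ih v hv
      obtain ⟨k', hk', hle'⟩ := pvLe_fold edges (pvRounds edges r) v k hk
      exact ⟨k', hk', by push_cast; omega⟩
    · obtain ⟨ku, hku, hkule⟩ := ih u hu
      rcases he with hm | hm
      · obtain ⟨l1, l2, hsplit⟩ := List.append_of_mem hm
        have h1 : pvRounds edges (r+1)
            = l2.foldl pvEdgeStep (pvEdgeStep (l1.foldl pvEdgeStep (pvRounds edges r)) [u, v]) := by
          show pvRound edges (pvRounds edges r) = _
          unfold pvRound
          conv_lhs => rw [hsplit]
          rw [List.foldl_append, List.foldl_cons, ← hsplit]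
        rw [h1]
        obtain ⟨ku', hku', hkule'⟩ := pvLe_fold l1 (pvRounds edges r) u ku hku
        rw [show pvEdgeStep (l1.foldl pvEdgeStep (pvRounds edges r)) [u, v]
            = pvRelax (pvRelax (l1.foldl pvEdgeStep (pvRounds edges r)) u v) v u from rfl]
        obtain ⟨kv, hkv, hkvle⟩ := pvRelax_bound _ u v ku' hku'
        obtain ⟨kv', hkv', hkvle'⟩ := pvLe_relax _ v u v kv hkv
        obtain ⟨kv'', hkv'', hkvle''⟩ := pvLe_fold l2 _ v kv' hkv'
        exact ⟨kv'', hkv'', by push_cast; omega⟩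
      · obtain ⟨l1, l2, hsplit⟩ := List.append_of_mem hm
        have h1 : pvRounds edges (r+1)
            = l2.foldl pvEdgeStep (pvEdgeStep (l1.foldl pvEdgeStep (pvRounds edges r)) [v, u]) := by
          show pvRound edges (pvRounds edges r) = _
          unfold pvRound
          conv_lhs => rw [hsplit]
          rw [List.foldl_append, List.foldl_cons, ← hsplit]
        rw [h1]
        obtain ⟨ku', hku', hkule'⟩ := pvLe_fold l1 (pvRounds edges r) u ku hku
        rw [show pvEdgeStep (l1.foldl pvEdgeStep (pvRounds edges r)) [v, u]
            = pvRelax (pvRelax (l1.foldl pvEdgeStep (pvRounds edges r)) v u) u v from rfl]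
        obtain ⟨ku2, hku2, hku2le⟩ := pvLe_relax _ v u u ku' hku'
        obtain ⟨kv, hkv, hkvle⟩ := pvRelax_bound _ u v ku2 hku2
        obtain ⟨kv', hkv', hkvle'⟩ := pvLe_fold l2 _ v kv hkv
        exact ⟨kv', hkv', by push_cast; omega⟩


noncomputable def pvDmin (edges : List (List Int)) (v : Int)
    (h : ∃ m, pvBall edges m v) : Nat :=
  @Nat.find (fun m => pvBall edges m v) (Classical.decPred _) h

lemma pvDmin_spec (edges : List (List Int)) (v : Int) (h : ∃ m, pvBall edges m v) :
    pvBall edges (pvDmin edges v h) v :=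
  @Nat.find_spec (fun m => pvBall edges m v) (Classical.decPred _) h

lemma pvDmin_le (edges : List (List Int)) (v : Int) (h : ∃ m, pvBall edges m v) {m : Nat}
    (hm : pvBall edges m v) : pvDmin edges v h ≤ m :=
  @Nat.find_min' (fun m => pvBall edges m v) (Classical.decPred _) h m hm

-- ---------- putting B's loop into round form ----------

lemma pvRange_fold_rounds (edges : List (List Int)) :
    ∀ n : Nat, (List.range n).foldl (fun d _ => pvRound edges d) pvD0 = pvRounds edges n := by
  intro n
  induction n with
  | zero => rfl
  | succ n ih =>
    rw [List.range_succ, List.foldl_append, List.foldl_cons, List.foldl_nil, ih]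
    rfl

lemma pvBF_eq_rounds (edges : List (List Int)) :
    (PySem.List.pyRange 0 (2 * (edges.length : Int)) 1).foldl
      (fun d _ => pvRound edges d) (PySem.Dict.ofList [(1, 0)])
    = pvRounds edges (2 * edges.length) := by
  rw [PySem.List.pyRange_one, List.foldl_map]
  rw [show ((2 * (edges.length : Int) - 0)).toNat = 2 * edges.length from by omega]
  exact pvRange_fold_rounds edges (2 * edges.length)

-- ---------- the final dict: unique keys, exact distances, max value ----------

lemma pvNodup_relax (d : PySem.Dict Int Int) (a b : Int) (h : d.keys.Nodup) :
    (pvRelax d a b).keys.Nodup := by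
  cases hga : d.get? a with
  | none => rw [pvRelax_of_none b hga]; exact h
  | some da =>
    cases hgb : d.get? b with
    | none => rw [pvRelax_of_new hga hgb]; exact PySem.Dict.nodup_keys_insert d b (da+1) h
    | some db =>
      by_cases hlt : da + 1 < db
      · rw [pvRelax_of_lt hga hgb hlt]; exact PySem.Dict.nodup_keys_insert d b (da+1) h
      · rw [pvRelax_of_ge hga hgb hlt]; exact h

lemma pvNodup_edgeStep (d : PySem.Dict Int Int) (e : List Int) (h : d.keys.Nodup) :
    (pvEdgeStep d e).keys.Nodup := by
  unfold pvEdgeStep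
  match e with
  | [] => exact h
  | [u] => exact h
  | [u, v] => exact pvNodup_relax _ v u (pvNodup_relax d u v h)
  | u :: v :: w :: t => exact h

lemma pvNodup_fold (l : List (List Int)) :
    ∀ d : PySem.Dict Int Int, d.keys.Nodup → (l.foldl pvEdgeStep d).keys.Nodup := by
  induction l with
  | nil => intro d h; exact h
  | cons e l ih =>
    intro d h
    rw [List.foldl_cons]
    exact ih _ (pvNodup_edgeStep d e h)

lemma pvNodupKeys_rounds (edges : List (List Int)) (r : Nat) :
    (pvRounds edges r).keys.Nodup := by
  induction r with
  | zero => exact List.nodup_cons.2 ⟨by simp, List.nodup_nil⟩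
  | succ r ih => exact pvNodup_fold edges _ ih

lemma pvExact (edges : List (List Int)) (hex : ∃ k, pvStable edges k)
    (hRecc : pvEcc edges hex ≤ 2 * edges.length) :
    ∀ v k, (pvRounds edges (2 * edges.length)).get? v = some k →
    ∃ (hv : ∃ m, pvBall edges m v), k = (pvDmin edges v hv : Int) := by
  intro v k h
  obtain ⟨hk0, hball⟩ := pvSound_rounds edges (2 * edges.length) v k h
  have hv : ∃ m, pvBall edges m v := ⟨k.toNat, hball⟩
  refine ⟨hv, ?_⟩
  have hlow : pvDmin edges v hv ≤ k.toNat := pvDmin_le edges v hv hball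
  have hdle : pvDmin edges v hv ≤ 2 * edges.length :=
    le_trans (pvDmin_le edges v hv (pvBall_le_ecc edges hex _ v (pvDmin_spec edges v hv))) hRecc
  obtain ⟨k1, hk1, hk1le⟩ := pvComplete edges (pvDmin edges v hv) v (pvDmin_spec edges v hv)
  obtain ⟨k2, hk2, hk2le⟩ := pvLe_rounds edges hdle v k1 hk1
  rw [h] at hk2
  injection hk2 with hk2
  omega

lemma pvMem_values_of_get? (d : PySem.Dict Int Int) (v k : Int) (h : d.get? v = some k) :
    k ∈ d.values := by
  have hitem := PySem.Dict.mem_items_of_get?_eq_some _ h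
  unfold PySem.Dict.values
  exact List.mem_map.2 ⟨(v, k), hitem, rfl⟩

lemma pvMax_values (edges : List (List Int)) (hex : ∃ k, pvStable edges k)
    (hRecc : pvEcc edges hex ≤ 2 * edges.length) :
    PySem.List.max? (pvRounds edges (2 * edges.length)).values (fun y => y)
      = some ((pvEcc edges hex : Nat) : Int) := by
  set R := 2 * edges.length with hR
  set d := pvRounds edges R with hd
  -- every value is at most the eccentricity
  have hub : ∀ y ∈ d.values, y ≤ (pvEcc edges hex : Int) := by
    intro y hy
    unfold PySem.Dict.values at hy
    obtain ⟨p, hp, hpy⟩ := List.mem_map.1 hy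
    have hget : d.get? p.1 = some p.2 :=
      PySem.Dict.get?_of_mem_items d (by rw [show (p.1, p.2) = p from rfl]; exact hp)
        (pvNodupKeys_rounds edges R)
    obtain ⟨hv, hval⟩ := pvExact edges hex hRecc p.1 p.2 hget
    rw [← hpy, hval]
    have : pvDmin edges p.1 hv ≤ pvEcc edges hex :=
      pvDmin_le edges p.1 hv (pvBall_le_ecc edges hex _ p.1 (pvDmin_spec edges p.1 hv))
    exact_mod_cast this
  -- the eccentricity is attained by some value
  have hmem : ((pvEcc edges hex : Nat) : Int) ∈ d.values := by
    cases hecc : pvEcc edges hex with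
    | zero =>
      obtain ⟨k1, hk1, _⟩ := pvComplete edges 0 1 rfl
      obtain ⟨k2, hk2, _⟩ := pvLe_rounds edges (Nat.zero_le R) 1 k1 hk1
      obtain ⟨hv, hval⟩ := pvExact edges hex hRecc 1 k2 hk2
      have hdm : pvDmin edges 1 hv = 0 := Nat.le_zero.1 (pvDmin_le edges 1 hv rfl)
      have hk2' : k2 = ((0 : Nat) : Int) := by rw [hval, hdm]
      rw [hk2'] at hk2
      exact pvMem_values_of_get? d 1 _ hk2
    | succ K =>
      have hns : ¬ pvStable edges K := pvEcc_min edges hex (by omega)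
      rw [pvStable] at hns
      push_neg at hns
      obtain ⟨x, hb1, hb0⟩ := hns
      have hKR : K + 1 ≤ R := by omega
      obtain ⟨k1, hk1, _⟩ := pvComplete edges (K+1) x hb1
      obtain ⟨k2, hk2, _⟩ := pvLe_rounds edges hKR x k1 hk1
      obtain ⟨hv, hval⟩ := pvExact edges hex hRecc x k2 hk2
      have hdub : pvDmin edges x hv ≤ K + 1 := pvDmin_le edges x hv hb1
      have hdlb : ¬ pvDmin edges x hv ≤ K := by
        intro hle
        exact hb0 (pvBall_mono_le edges hle x (pvDmin_spec edges x hv))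
      have hdm : pvDmin edges x hv = K + 1 := by omega
      have : k2 = ((K + 1 : Nat) : Int) := by rw [hval, hdm]
      rw [this] at hk2
      exact pvMem_values_of_get? d x _ hk2
  cases hmax : PySem.List.max? d.values (fun y => y) with
  | none =>
    rw [PySem.List.max?_eq_none_iff] at hmax
    rw [hmax] at hmem
    cases hmem
  | some m =>
    have hm1 : m ∈ d.values := PySem.List.max?_mem hmax
    have hm2 : ((pvEcc edges hex : Nat) : Int) ≤ m := PySem.List.max?_isMax hmax _ hmem
    have hm3 : m ≤ ((pvEcc edges hex : Nat) : Int) := hub m hm1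
    rw [show m = ((pvEcc edges hex : Nat) : Int) from le_antisymm hm3 hm2]

-- ===== VERDICT (by name: the statement is the Claim_ definition above) =====
theorem assignEdgeWeights_spec : Claim_equal_assignEdgeWeights := by
  intro edges _ hpre
  unfold Spec_assignEdgeWeights
  obtain ⟨hshape, e0, he0, x0, hx0, hx01⟩ := hpre
  have hshape2 : ∀ e ∈ edges, e.length = 2 := fun e he => (hshape e he).1
  have hbase : ∀ node y, y ∈ (PySem.Dict.empty : PySem.Dict Int (List Int)).getD node [] →
      0 ≤ y ∧ y ≤ (0:Int) := by
    intro node y hy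
    rw [PySem.Dict.getD_empty] at hy
    cases hy
  obtain ⟨hn0, hvals⟩ := pvBuildA_bounds edges (PySem.Dict.empty, 0) hshape (le_refl 0) hbase
  have hn1 : 1 ≤ (pvBuildA edges (PySem.Dict.empty, 0)).2 :=
    le_trans hx01 (pvBuildA_ge edges (PySem.Dict.empty, 0) hshape2 e0 he0 x0 hx0)
  set n := (pvBuildA edges (PySem.Dict.empty, 0)).2 with hn
  have hlen1 : (1 : Nat) < (n+1).toNat := by omega
  have hset : PySem.List.pySetD (List.replicate (n+1).toNat false) 1 true
      = (List.replicate (n+1).toNat false).set 1 true := by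
    rw [PySem.List.pySetD_of_nonneg _ _ (by norm_num : (0:Int) ≤ 1)]
    rfl
  have hmem1 : (1 : Int) ∈ PySem.Set.ofList [(1 : Int)] := by
    rw [PySem.Set.mem_ofList]
    simp
  have hmemofList : ∀ x : Int, x ∈ PySem.Set.ofList [(1 : Int)] → x = 1 := by
    intro x hx
    rw [PySem.Set.mem_ofList] at hx
    simpa using hx
  have hkey : pvBfsA (pvBuildA edges (PySem.Dict.empty, 0)).1 [1]
      (PySem.List.pySetD (List.replicate (n+1).toNat false) 1 true)
      (List.replicate (n+1).toNat (0:Int)) 0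
      = pvLevelsB (pvBuildA edges (PySem.Dict.empty, 0)).1 (PySem.Set.ofList [1]) [1] 0 := by
    rw [pvLLF_nil]
    rw [hset]
    have := pvMain (pvBuildA edges (PySem.Dict.empty, 0)).1 n hvals
      (([1] ++ ([] : List Int)).length + ((List.replicate (n+1).toNat false).set 1 true).count false)
      [1] [] ((List.replicate (n+1).toNat false).set 1 true)
      (List.replicate (n+1).toNat (0:Int)) 0 0 (PySem.Set.ofList [1])
      (le_refl _)
      (by rw [List.length_set, List.length_replicate])
      (by rw [List.length_replicate])
      (by
        intro x hx0' hxn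
        rw [PySem.List.pyGet?_of_nonneg _ hx0']
        constructor
        · intro hg
          rw [PySem.Set.mem_ofList]
          by_contra hne
          have hxne1 : x ≠ 1 := by simpa using hne
          rw [List.getElem?_set_ne (show (1:Nat) ≠ x.toNat by omega)] at hg
          rw [List.getElem?_replicate] at hg
          split_ifs at hg
          simp_all
        · intro hxm
          have hx1 : x = 1 := hmemofList x hxm
          subst hx1
          rw [show ((1:Int).toNat) = 1 from rfl]
          rw [List.getElem?_set_self (by rw [List.length_replicate]; exact hlen1)]
      )
      (by
        intro x hx
        have := hmemofList x hx
        subst this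
        omega)
      (by
        intro x hx
        have : x = 1 := by simpa using hx
        subst this
        exact hmem1)
      (by
        intro x hx
        have : x = 1 := by simpa using hx
        subst this
        rw [PySem.List.pyGet?_of_nonneg _ (by norm_num : (0:Int) ≤ 1)]
        rw [show ((1:Int).toNat) = 1 from rfl]
        rw [List.getElem?_replicate, if_pos hlen1]
      )
      (by intro x hx; cases hx)
      (by simp)
      (by intro _; rfl)
    simpa using this
  obtain ⟨k0, hk0le, hk0⟩ := pvExists_stable edges hshape2
  have hexk : ∃ k, pvStable edges k := ⟨k0, hk0⟩
  have hRecc : pvEcc edges hexk ≤ 2 * edges.length :=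
    le_trans (pvEcc_le edges hexk hk0) hk0le
  have hadj : ∀ x y, y ∈ (pvBuildA edges (PySem.Dict.empty, 0)).1.getD x [] ↔ pvE edges x y := by
    intro x y
    rw [pvAdj_mem edges (PySem.Dict.empty, 0) x y hshape2]
    rw [show ((PySem.Dict.empty, (0:Int)) : PySem.Dict Int (List Int) × Int).1
        = (PySem.Dict.empty : PySem.Dict Int (List Int)) from rfl]
    rw [PySem.Dict.getD_empty]
    simp
  have hlv : pvLevelsB (pvBuildA edges (PySem.Dict.empty, 0)).1 (PySem.Set.ofList [1]) [1] (0 : Int)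
      = (pvEcc edges hexk : Int) := by
    have := pvLevels_ecc edges (pvBuildA edges (PySem.Dict.empty, 0)).1 hadj hexk
      (pvEcc edges hexk) 0 (PySem.Set.ofList [1]) [1] (by omega)
      (by
        intro x
        rw [PySem.Set.mem_ofList, List.mem_singleton]
        exact Iff.rfl)
      (by
        intro x
        rw [List.mem_singleton]
        exact Iff.rfl)
      (Nat.zero_le _)
    simpa using this
  simp only [assignEdgeWeights, assignEdgeWeights_alt]
  rw [pvBF_eq_rounds, pvMax_values edges hexk hRecc]
  rw [hn] at hkey
  rw [hkey, hlv]
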